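-- pv_equiv track=rewrite | github.com/Pandaemonium/CausalOctonionGraph | calc/test_rel_emergence.py | reachable_in_ticks
-- ===== SOURCE A (Python) =====
-- def reachable_in_ticks(adj, start, ticks):
--     """BFS: set of nodes reachable from start in at most ticks steps."""
--     visited = {start}
--     frontier = {start}
--     for _ in range(ticks):
--         next_frontier = set()
--         for node in frontier:
--             for nb in adj.get(node, []):
--                 if nb not in visited:
--                     next_frontier.add(nb)
--                     visited.add(nb)
--         frontier = next_frontier
--         if not frontier:
--             break
--     return visited
-- ===== SOURCE B (Python) =====
-- def reachable_in_ticks(adj, start, ticks):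
--     """BFS with a single FIFO queue of (node, depth) pairs instead of layer sets."""
--     visited = {start}
--     queue = [(start, 0)]
--     i = 0
--     while i < len(queue):
--         node, d = queue[i]
--         i += 1
--         if d >= ticks:
--             continue
--         for nb in adj.get(node, []):
--             if nb not in visited:
--                 visited.add(nb)
--                 queue.append((nb, d + 1))
--     return visited
-- ===== Notes on version B (the rewrite author's own statement) =====
-- stated objective: alternative
-- what changed: Replaces the layer-synchronous frontier loop (rebuilding a new frontier set per tick and counting ticks with an outer for-loop) by a single FIFO queue of (node, depth) pairs drained in one while-loop, with the depth cutoff checked per node.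
import Mathlib
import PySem

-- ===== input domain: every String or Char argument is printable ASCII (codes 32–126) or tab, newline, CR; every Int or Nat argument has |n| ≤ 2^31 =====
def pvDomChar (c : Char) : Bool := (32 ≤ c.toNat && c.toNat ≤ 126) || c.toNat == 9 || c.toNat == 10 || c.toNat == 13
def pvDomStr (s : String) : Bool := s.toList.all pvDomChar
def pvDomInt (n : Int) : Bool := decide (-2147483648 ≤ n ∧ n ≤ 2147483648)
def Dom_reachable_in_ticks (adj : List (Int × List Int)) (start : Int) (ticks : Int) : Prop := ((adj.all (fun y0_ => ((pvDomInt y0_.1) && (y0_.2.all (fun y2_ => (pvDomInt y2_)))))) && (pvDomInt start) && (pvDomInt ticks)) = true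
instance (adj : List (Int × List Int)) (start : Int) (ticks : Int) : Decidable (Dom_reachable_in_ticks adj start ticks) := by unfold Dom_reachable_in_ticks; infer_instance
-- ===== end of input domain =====

-- B replaces A's layer-synchronous frontier loop by a single FIFO queue of (node, depth) pairs; same reachable set.


-- ===== PORT A =====
-- adj.get(node, []) (shared by both Pythons)
def pvGetNbrs (adj : List (Int × List Int)) (node : Int) : List Int :=
  PySem.Dict.getD (PySem.Dict.mk adj) node []

-- A's innermost statement: if nb not in visited: next_frontier.add(nb); visited.add(nb)
-- state = (next_frontier, visited)
def pvStepA (st : PySem.Set Int × PySem.Set Int) (nb : Int) : PySem.Set Int × PySem.Set Int :=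
  if PySem.Set.contains st.2 nb then st
  else (PySem.Set.add st.1 nb, PySem.Set.add st.2 nb)

-- A's inner two loops of one tick: for node in frontier: for nb in adj.get(node, []): …
def pvLayerA (adj : List (Int × List Int)) (frontier : List Int)
    (st : PySem.Set Int × PySem.Set Int) : PySem.Set Int × PySem.Set Int :=
  frontier.foldl (fun st node => (pvGetNbrs adj node).foldl pvStepA st) st

-- A's 'for _ in range(ticks)' loop with the early 'break' on an empty frontier
def pvLoopA (adj : List (Int × List Int)) : Nat → PySem.Set Int → PySem.Set Int → PySem.Set Int
  | 0, _, visited => visited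
  | t + 1, frontier, visited =>
    let st := pvLayerA adj frontier (PySem.Set.empty, visited)
    if st.1.isEmpty then st.2 else pvLoopA adj t st.1 st.2

def reachable_in_ticks (adj : List (Int × List Int)) (start : Int) (ticks : Int) : List Int :=
  pvLoopA adj ticks.toNat (PySem.Set.ofList [start]) (PySem.Set.ofList [start])

-- ===== PORT B =====
-- fuel bound for B's while-loop: 1 + Σ |adjacency value lists| ≥ total number of queue pops
-- (a totality guard only; the proofs show it is never exhausted)
def pvFuelB (adj : List (Int × List Int)) : Nat :=
  1 + adj.foldl (fun a p => a + p.2.length) 0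

-- B's innermost statement: if nb not in visited: visited.add(nb); queue.append((nb, d + 1))
-- state = (visited, pending queue)
def pvStepB (e : Int) (st : PySem.Set Int × List (Int × Int)) (nb : Int) :
    PySem.Set Int × List (Int × Int) :=
  if PySem.Set.contains st.1 nb then st
  else (PySem.Set.add st.1 nb, st.2 ++ [(nb, e)])

-- B's while-loop: pop (node, d); skip if d >= ticks; else scan neighbours, appending fresh ones
def pvLoopB (adj : List (Int × List Int)) (ticks : Int) :
    Nat → List (Int × Int) → PySem.Set Int → PySem.Set Int
  | _, [], visited => visited
  | 0, _, visited => visited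
  | fuel + 1, (node, d) :: rest, visited =>
    if ticks ≤ d then pvLoopB adj ticks fuel rest visited
    else
      let st := (pvGetNbrs adj node).foldl (pvStepB (d + 1)) (visited, rest)
      pvLoopB adj ticks fuel st.2 st.1

def reachable_in_ticks_alt (adj : List (Int × List Int)) (start : Int) (ticks : Int) : List Int :=
  pvLoopB adj ticks (pvFuelB adj) [(start, 0)] (PySem.Set.ofList [start])

-- ===== PRECONDITION & SPEC =====
def Spec_reachable_in_ticks (adj : List (Int × List Int)) (start : Int) (ticks : Int) (out : List Int) : Prop := out = reachable_in_ticks_alt adj start ticks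
instance (adj : List (Int × List Int)) (start : Int) (ticks : Int) (out : List Int) : Decidable (Spec_reachable_in_ticks adj start ticks out) := by unfold Spec_reachable_in_ticks; infer_instance

-- ===== CLAIM (what is proved, stated in full; the proofs are below) =====
def Claim_equal_reachable_in_ticks : Prop := ∀ (adj : List (Int × List Int)) (start : Int) (ticks : Int), Dom_reachable_in_ticks adj start ticks → Spec_reachable_in_ticks adj start ticks (reachable_in_ticks adj start ticks)

-- ===== LEMMAS AND PROOFS =====

-- all neighbour entries of adj (with multiplicity)
def pvAllNbrs (adj : List (Int × List Int)) : List Int := adj.flatMap (fun p => p.2)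

lemma pvFuel_sum (adj : List (Int × List Int)) :
    ∀ acc : Nat, adj.foldl (fun a p => a + p.2.length) acc = acc + (pvAllNbrs adj).length := by
  induction adj with
  | nil => intro acc; simp [pvAllNbrs]
  | cons p adj ih =>
      intro acc
      simp only [List.foldl_cons, pvAllNbrs, List.flatMap_cons, List.length_append, ih]
      omega

lemma pvGetNbrs_subset (adj : List (Int × List Int)) (node : Int) :
    ∀ x ∈ pvGetNbrs adj node, x ∈ pvAllNbrs adj := by
  induction adj with
  | nil => intro x hx; simp [pvGetNbrs, PySem.Dict.getD, PySem.Dict.get?] at hx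
  | cons p adj ih =>
      obtain ⟨k, vs⟩ := p
      intro x hx
      simp only [pvGetNbrs, PySem.Dict.getD, PySem.Dict.get?_mk_cons] at hx ih
      simp only [pvAllNbrs, List.flatMap_cons, List.mem_append]
      by_cases h : k == node
      · rw [if_pos h] at hx; exact Or.inl (by simpa using hx)
      · rw [if_neg h] at hx
        exact Or.inr (by simpa [pvAllNbrs] using ih x hx)

lemma pvStepA_of_mem (st : PySem.Set Int × PySem.Set Int) (nb : Int) (h : nb ∈ st.2) :
    pvStepA st nb = st := by
  unfold pvStepA; rw [if_pos ((PySem.Set.contains_iff st.2 nb).mpr h)]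

lemma pvStepA_of_not_mem (st : PySem.Set Int × PySem.Set Int) (nb : Int) (h : nb ∉ st.2) :
    pvStepA st nb = (PySem.Set.add st.1 nb, PySem.Set.add st.2 nb) := by
  unfold pvStepA
  rw [if_neg (fun hc => h ((PySem.Set.contains_iff st.2 nb).mp hc))]

lemma pvStepB_of_mem (e : Int) (st : PySem.Set Int × List (Int × Int)) (nb : Int)
    (h : nb ∈ st.1) : pvStepB e st nb = st := by
  unfold pvStepB; rw [if_pos ((PySem.Set.contains_iff st.1 nb).mpr h)]

lemma pvStepB_of_not_mem (e : Int) (st : PySem.Set Int × List (Int × Int)) (nb : Int)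
    (h : nb ∉ st.1) : pvStepB e st nb = (PySem.Set.add st.1 nb, st.2 ++ [(nb, e)]) := by
  unfold pvStepB
  rw [if_neg (fun hc => h ((PySem.Set.contains_iff st.1 nb).mp hc))]

-- ONE popped node's neighbour scan: B's fold mirrors A's fold, fresh nodes are appended to the queue
lemma pvNbrFold (e : Int) (nbs : List Int) :
    ∀ (nf v : PySem.Set Int) (q : List (Int × Int)),
    (∀ x ∈ nf, x ∈ v) →
    (nbs.foldl (pvStepB e) (v, q ++ nf.map (fun x => (x, e)))
      = ((nbs.foldl pvStepA (nf, v)).2,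
         q ++ (nbs.foldl pvStepA (nf, v)).1.map (fun x => (x, e))))
    ∧ (∀ x ∈ (nbs.foldl pvStepA (nf, v)).1, x ∈ (nbs.foldl pvStepA (nf, v)).2)
    ∧ ((nbs.foldl pvStepA (nf, v)).1.length + v.length
        = nf.length + (nbs.foldl pvStepA (nf, v)).2.length)
    ∧ (∀ x ∈ (nbs.foldl pvStepA (nf, v)).2, x ∈ v ∨ x ∈ nbs)
    ∧ (v.Nodup → (nbs.foldl pvStepA (nf, v)).2.Nodup) := by
  induction nbs with
  | nil =>
      intro nf v q hsub
      exact ⟨rfl, hsub, rfl, fun x hx => Or.inl hx, fun h => h⟩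
  | cons nb nbs ih =>
      intro nf v q hsub
      simp only [List.foldl_cons]
      by_cases hmem : nb ∈ v
      · rw [pvStepB_of_mem (e) (v, q ++ nf.map (fun x => (x, e))) nb hmem,
            pvStepA_of_mem (nf, v) nb hmem]
        obtain ⟨e1, e2, e3, e4, e5⟩ := ih nf v q hsub
        exact ⟨e1, e2, e3, fun x hx => (e4 x hx).imp id (List.mem_cons_of_mem _), e5⟩
      · have hnf : nb ∉ nf := fun h => hmem (hsub nb h)
        rw [pvStepB_of_not_mem (e) (v, q ++ nf.map (fun x => (x, e))) nb hmem,
            pvStepA_of_not_mem (nf, v) nb hmem]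
        dsimp only
        have hadds : PySem.Set.add nf nb = nf ++ [nb] := PySem.Set.add_of_not_mem hnf
        have haddv : PySem.Set.add v nb = v ++ [nb] := PySem.Set.add_of_not_mem hmem
        have hsub' : ∀ x ∈ PySem.Set.add nf nb, x ∈ PySem.Set.add v nb := by
          intro x hx
          rcases (PySem.Set.mem_add nf nb x).mp hx with h | h
          · exact (PySem.Set.mem_add v nb x).mpr (Or.inl (hsub x h))
          · exact (PySem.Set.mem_add v nb x).mpr (Or.inr h)
        obtain ⟨heq, h1, h2, h3, h4⟩ := ih (PySem.Set.add nf nb) (PySem.Set.add v nb) q hsub'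
        have hq : (q ++ nf.map (fun x => (x, e))) ++ [(nb, e)]
            = q ++ (PySem.Set.add nf nb).map (fun x => (x, e)) := by
          rw [hadds]; simp
        have l1 : (PySem.Set.add nf nb).length = nf.length + 1 := by
          rw [hadds]; simp
        have l2 : (PySem.Set.add v nb).length = v.length + 1 := by
          rw [haddv]; simp
        refine ⟨?_, h1, ?_, ?_, ?_⟩
        · rw [hq]; exact heq
        · omega
        · intro x hx
          rcases h3 x hx with h | h
          · rcases (PySem.Set.mem_add v nb x).mp h with h | h
            · exact Or.inl h
            · subst h; exact Or.inr List.mem_cons_self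
          · exact Or.inr (List.mem_cons_of_mem _ h)
        · intro hnd
          apply h4
          rw [haddv]
          exact List.Nodup.append hnd (List.nodup_singleton nb) (by simpa using hmem)

-- pvLayerA as a fold of pvStepA over the concatenated neighbour lists, node by node
lemma pvLayerA_cons (adj : List (Int × List Int)) (node : Int) (layer : List Int)
    (st : PySem.Set Int × PySem.Set Int) :
    pvLayerA adj (node :: layer) st
      = pvLayerA adj layer ((pvGetNbrs adj node).foldl pvStepA st) := rfl

-- processing one whole layer of the queue (all entries at depth d < ticks)
lemma pvLayerSim (adj : List (Int × List Int)) (ticks d : Int) (hd : ¬ ticks ≤ d) :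
    ∀ (layer : List Int) (nf v : PySem.Set Int) (fuel : Nat),
    (∀ x ∈ nf, x ∈ v) →
    (pvLoopB adj ticks (fuel + layer.length)
        (layer.map (fun x => (x, d)) ++ nf.map (fun x => (x, d + 1))) v
      = pvLoopB adj ticks fuel
          ((pvLayerA adj layer (nf, v)).1.map (fun x => (x, d + 1)))
          (pvLayerA adj layer (nf, v)).2)
    ∧ (∀ x ∈ (pvLayerA adj layer (nf, v)).1, x ∈ (pvLayerA adj layer (nf, v)).2)
    ∧ ((pvLayerA adj layer (nf, v)).1.length + v.length
        = nf.length + (pvLayerA adj layer (nf, v)).2.length)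
    ∧ (∀ x ∈ (pvLayerA adj layer (nf, v)).2, x ∈ v ∨ x ∈ pvAllNbrs adj)
    ∧ (v.Nodup → (pvLayerA adj layer (nf, v)).2.Nodup) := by
  intro layer
  induction layer with
  | nil =>
      intro nf v fuel hsub
      exact ⟨rfl, hsub, rfl, fun x hx => Or.inl hx, fun h => h⟩
  | cons node layer ih =>
      intro nf v fuel hsub
      rw [pvLayerA_cons]
      obtain ⟨heq, h1, h2, h3, h4⟩ :=
        pvNbrFold (d + 1) (pvGetNbrs adj node) nf v (layer.map (fun x => (x, d))) hsub
      have hstep : pvLoopB adj ticks (fuel + (node :: layer).length)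
          ((node :: layer).map (fun x => (x, d)) ++ nf.map (fun x => (x, d + 1))) v
          = pvLoopB adj ticks (fuel + layer.length)
              (layer.map (fun x => (x, d))
                ++ ((pvGetNbrs adj node).foldl pvStepA (nf, v)).1.map (fun x => (x, d + 1)))
              ((pvGetNbrs adj node).foldl pvStepA (nf, v)).2 := by
        rw [show fuel + (node :: layer).length = (fuel + layer.length) + 1 from by simp; omega]
        simp only [List.map_cons, List.cons_append, pvLoopB, if_neg hd]
        rw [heq]
      obtain ⟨ieq, i1, i2, i3, i4⟩ :=
        ih ((pvGetNbrs adj node).foldl pvStepA (nf, v)).1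
           ((pvGetNbrs adj node).foldl pvStepA (nf, v)).2 fuel h1
      refine ⟨?_, ?_, ?_, ?_, ?_⟩
      · rw [hstep, ieq]
      · simpa using i1
      · have := i2
        simp only [Prod.mk.eta] at this ⊢
        omega
      · intro x hx
        rcases i3 x hx with h | h
        · rcases h3 x h with h' | h'
          · exact Or.inl h'
          · exact Or.inr (pvGetNbrs_subset adj node x h')
        · exact Or.inr h
      · intro hnd
        have := i4 (h4 hnd)
        simpa using this

-- entries at depth ≥ ticks are popped and skipped
lemma pvDrain (adj : List (Int × List Int)) (ticks d : Int) (hd : ticks ≤ d) :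
    ∀ (layer : List Int) (v : PySem.Set Int) (fuel : Nat),
    pvLoopB adj ticks (fuel + layer.length) (layer.map (fun x => (x, d))) v = v := by
  intro layer
  induction layer with
  | nil => intro v fuel; simp [pvLoopB]
  | cons x layer ih =>
      intro v fuel
      rw [show fuel + (x :: layer).length = (fuel + layer.length) + 1 from by simp; omega]
      simp only [List.map_cons, pvLoopB, if_pos hd]
      exact ih v fuel

lemma pvOuter (adj : List (Int × List Int)) (start ticks : Int) :
    ∀ (t : Nat) (d : Int) (f v : PySem.Set Int) (fuel : Nat),
    d = ticks - t →
    v.Nodup →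
    (∀ x ∈ v, x = start ∨ x ∈ pvAllNbrs adj) →
    f.length + (pvAllNbrs adj).length + 1 ≤ fuel + v.length →
    pvLoopB adj ticks fuel (f.map (fun x => (x, d))) v = pvLoopA adj t f v := by
  intro t
  induction t with
  | zero =>
      intro d f v fuel hdt hnd hmem hfuel
      have hcard : v.length ≤ (pvAllNbrs adj).length + 1 := by
        have hsp : v.Subperm (start :: pvAllNbrs adj) :=
          List.Nodup.subperm hnd (fun x hx => by
            rcases hmem x hx with h | h
            · exact h ▸ List.mem_cons_self
            · exact List.mem_cons_of_mem _ h)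
        simpa using hsp.length_le
      obtain ⟨k, rfl⟩ : ∃ k, fuel = k + f.length := ⟨fuel - f.length, by omega⟩
      rw [pvDrain adj ticks d (by omega) f v k]
      rfl
  | succ t ih =>
      intro d f v fuel hdt hnd hmem hfuel
      have hcard : v.length ≤ (pvAllNbrs adj).length + 1 := by
        have hsp : v.Subperm (start :: pvAllNbrs adj) :=
          List.Nodup.subperm hnd (fun x hx => by
            rcases hmem x hx with h | h
            · exact h ▸ List.mem_cons_self
            · exact List.mem_cons_of_mem _ h)
        simpa using hsp.length_le
      have hd' : ¬ ticks ≤ d := by omega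
      obtain ⟨fuel', rfl⟩ : ∃ k, fuel = k + f.length := ⟨fuel - f.length, by omega⟩
      obtain ⟨heq, h1, h2, h3, h4⟩ := pvLayerSim adj ticks d hd' f [] v fuel' (by simp)
      have heq' : pvLoopB adj ticks (fuel' + f.length) (f.map (fun x => (x, d))) v
          = pvLoopB adj ticks fuel'
              ((pvLayerA adj f ([], v)).1.map (fun x => (x, d + 1)))
              (pvLayerA adj f ([], v)).2 := by
        simpa using heq
      rw [heq']
      show _ = pvLoopA adj (t + 1) f v
      simp only [pvLoopA]
      have hempty : PySem.Set.empty = ([] : List Int) := rfl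
      rw [hempty]
      by_cases hemp : (pvLayerA adj f ([], v)).1 = []
      · rw [hemp]
        simp [pvLoopB]
      · rw [if_neg (by simpa [List.isEmpty_iff] using hemp)]
        apply ih (d + 1) (pvLayerA adj f ([], v)).1 (pvLayerA adj f ([], v)).2 fuel'
        · omega
        · exact h4 hnd
        · intro x hx
          rcases h3 x hx with h | h
          · exact hmem x h
          · exact Or.inr h
        · simp only [List.length_nil] at h2
          omega

-- ===== VERDICT (by name: the statement is the Claim_ definition above) =====
theorem reachable_in_ticks_spec : Claim_equal_reachable_in_ticks := by
  intro adj start ticks _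
  show reachable_in_ticks adj start ticks = reachable_in_ticks_alt adj start ticks
  unfold reachable_in_ticks reachable_in_ticks_alt pvFuelB
  rw [pvFuel_sum adj 0]
  have hofl : PySem.Set.ofList [start] = [start] := rfl
  rw [hofl]
  have hq : [((start : Int), (0 : Int))] = [start].map (fun x => (x, (0 : Int))) := by simp
  by_cases h0 : 0 ≤ ticks
  · rw [hq]
    refine (pvOuter adj start ticks ticks.toNat 0 [start] [start] _ ?_ ?_ ?_ ?_).symm
    · omega
    · simp
    · intro x hx; simp at hx; exact Or.inl hx
    · simp
  · rw [show ticks.toNat = 0 from by omega, hq,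
        show 1 + (0 + (pvAllNbrs adj).length) = (pvAllNbrs adj).length + [start].length from by
          simp; omega]
    rw [pvDrain adj ticks 0 (by omega) [start] [start] (pvAllNbrs adj).length]
    rfl
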